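-- pv_equiv track=rewrite | github.com/0xEisuke/atCoder | problems/AHC054/TreantsForest.py | make_ring_candidates
-- ===== SOURCE A (Python) =====
-- def make_ring_candidates(N, ti, tj, R):
--     # マンハッタン距離 R の簡易リング候補（北・南にゲート）
--     cand = []
--     for i in range(N):
--         for j in range(N):
--             if abs(i-ti) + abs(j-tj) == R:
--                 cand.append((i,j))
--     gates = set()
--     if cand:
--         g1 = min(cand, key=lambda x:(x[0], x[1]))    # 北（最上）
--         g2 = max(cand, key=lambda x:(x[0], -x[1]))   # 南（最下）
--         gates.add(g1); gates.add(g2)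
--     return [c for c in cand if c not in gates]
-- ===== SOURCE B (Python) =====
-- def make_ring_candidates(N, ti, tj, R):
--     # Enumerate the diamond |i-ti|+|j-tj| == R row by row: each row i holds at
--     # most the two cells (i, tj-d) and (i, tj+d) with d = R - |i-ti| >= 0.
--     cand = []
--     for i in range(N):
--         d = R - abs(i - ti)
--         if d >= 0:
--             if 0 <= tj - d < N:
--                 cand.append((i, tj - d))
--             if d > 0 and 0 <= tj + d < N:
--                 cand.append((i, tj + d))
--     if not cand:
--         return []
--     g1 = cand[0]                                   # cand is lex-sorted: north gate is its head
--     g2 = max(cand, key=lambda c: (c[0], -c[1]))    # south gate (bottom-most, then leftmost)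
--     return [c for c in cand if c != g1 and c != g2]
-- ===== Notes on version B (the rewrite author's own statement) =====
-- stated objective: faster
-- what changed: Instead of scanning all N^2 grid cells for Manhattan distance R, B enumerates the at-most-two boundary cells of each row directly (j = tj+-d with d = R-|i-ti|), clipped to the grid, and takes the north gate as the head of the lex-sorted candidate list.
import Mathlib
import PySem

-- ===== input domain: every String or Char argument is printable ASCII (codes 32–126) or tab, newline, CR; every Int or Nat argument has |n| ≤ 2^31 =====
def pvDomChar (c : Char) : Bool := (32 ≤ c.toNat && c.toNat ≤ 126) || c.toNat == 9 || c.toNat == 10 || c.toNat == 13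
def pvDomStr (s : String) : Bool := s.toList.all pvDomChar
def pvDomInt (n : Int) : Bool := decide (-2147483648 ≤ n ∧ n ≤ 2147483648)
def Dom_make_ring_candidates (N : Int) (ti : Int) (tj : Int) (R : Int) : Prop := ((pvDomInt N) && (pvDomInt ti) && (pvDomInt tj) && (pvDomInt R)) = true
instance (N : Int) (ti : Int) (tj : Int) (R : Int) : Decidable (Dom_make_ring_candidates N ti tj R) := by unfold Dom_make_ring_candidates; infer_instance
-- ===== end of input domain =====

-- B replaces A's O(N^2) scan of all grid cells by a direct O(N) enumeration of the
-- diamond's at-most-two boundary cells per row (asymptotically faster).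

-- ===== PORT A =====
def make_ring_candidates (N : Int) (ti : Int) (tj : Int) (R : Int) : List (Int × Int) :=
  let cand := (PySem.List.pyRange 0 N 1).foldl (fun acc i =>
    (PySem.List.pyRange 0 N 1).foldl (fun acc2 j =>
      if |i - ti| + |j - tj| = R then acc2 ++ [(i, j)] else acc2) acc) []
  let gates : PySem.Set (Int × Int) :=
    if !cand.isEmpty then
      match PySem.List.min2? cand (fun x => x.1) (fun x => x.2),
            PySem.List.max2? cand (fun x => x.1) (fun x => -x.2) with
      | some g1, some g2 => PySem.Set.add (PySem.Set.add PySem.Set.empty g1) g2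
      | _, _ => PySem.Set.empty
    else PySem.Set.empty
  cand.filter (fun c => !(PySem.Set.contains gates c))

-- ===== PORT B =====
def make_ring_candidates_alt (N : Int) (ti : Int) (tj : Int) (R : Int) : List (Int × Int) :=
  let cand := (PySem.List.pyRange 0 N 1).foldl (fun acc i =>
    let d := R - |i - ti|
    if 0 ≤ d then
      let acc1 := if 0 ≤ tj - d ∧ tj - d < N then acc ++ [(i, tj - d)] else acc
      if 0 < d ∧ 0 ≤ tj + d ∧ tj + d < N then acc1 ++ [(i, tj + d)] else acc1
    else acc) []
  match cand with
  | [] => []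
  | g1 :: _ =>
    match PySem.List.max2? cand (fun c => c.1) (fun c => -c.2) with
    | some g2 => cand.filter (fun c => !(c == g1) && !(c == g2))
    | none => []

-- ===== PRECONDITION & SPEC =====
def Spec_make_ring_candidates (N : Int) (ti : Int) (tj : Int) (R : Int) (out : List (Int × Int)) : Prop := out = make_ring_candidates_alt N ti tj R
instance (N : Int) (ti : Int) (tj : Int) (R : Int) (out : List (Int × Int)) : Decidable (Spec_make_ring_candidates N ti tj R out) := by unfold Spec_make_ring_candidates; infer_instance

-- ===== CLAIM (what is proved, stated in full; the proofs are below) =====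
def Claim_equal_make_ring_candidates : Prop := ∀ (N : Int) (ti : Int) (tj : Int) (R : Int), Dom_make_ring_candidates N ti tj R → Spec_make_ring_candidates N ti tj R (make_ring_candidates N ti tj R)

-- ===== LEMMAS AND PROOFS =====

-- the two (clipped) boundary cells of row i of the diamond
def pvRow (N ti tj R i : Int) : List (Int × Int) :=
  (if 0 ≤ R - |i - ti| ∧ 0 ≤ tj - (R - |i - ti|) ∧ tj - (R - |i - ti|) < N
     then [(i, tj - (R - |i - ti|))] else []) ++
  (if 0 < R - |i - ti| ∧ 0 ≤ tj + (R - |i - ti|) ∧ tj + (R - |i - ti|) < N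
     then [(i, tj + (R - |i - ti|))] else [])

lemma pvRow_fst {N ti tj R i : Int} {c : Int × Int} (h : c ∈ pvRow N ti tj R i) : c.1 = i := by
  unfold pvRow at h
  rcases List.mem_append.1 h with h' | h' <;> (split at h' <;> simp_all)

lemma candB_eq (N ti tj R : Int) :
    (PySem.List.pyRange 0 N 1).foldl (fun acc i =>
      let d := R - |i - ti|
      if 0 ≤ d then
        let acc1 := if 0 ≤ tj - d ∧ tj - d < N then acc ++ [(i, tj - d)] else acc
        if 0 < d ∧ 0 ≤ tj + d ∧ tj + d < N then acc1 ++ [(i, tj + d)] else acc1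
      else acc) []
    = (PySem.List.pyRange 0 N 1).flatMap (pvRow N ti tj R) := by
  have hf : (fun (acc : List (Int × Int)) (i : Int) =>
      let d := R - |i - ti|
      if 0 ≤ d then
        let acc1 := if 0 ≤ tj - d ∧ tj - d < N then acc ++ [(i, tj - d)] else acc
        if 0 < d ∧ 0 ≤ tj + d ∧ tj + d < N then acc1 ++ [(i, tj + d)] else acc1
      else acc) = fun acc i => acc ++ pvRow N ti tj R i := by
    funext acc i
    simp only [pvRow]
    split_ifs <;> simp_all <;> omega
  rw [hf, PySem.List.foldl_append_eq_flatMap]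
  simp

lemma filter_range_pair_nat (a b : Int) (hab : a ≤ b) : ∀ (m : Nat),
    (PySem.List.pyRange 0 (m : Int) 1).filter (fun j => decide (j = a) || decide (j = b))
    = (if 0 ≤ a ∧ a < (m : Int) then [a] else []) ++ (if a < b ∧ 0 ≤ b ∧ b < (m : Int) then [b] else []) := by
  intro m
  induction m with
  | zero =>
      rw [show ((0:Nat):Int) = 0 by rfl, PySem.List.pyRange_one_eq_nil le_rfl]
      split_ifs <;> (try rfl) <;> (exfalso; omega)
  | succ m ih =>
      have h1 : ((m + 1 : Nat) : Int) = (m : Int) + 1 := by push_cast; ring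
      rw [h1, PySem.List.pyRange_one_succ_right (by positivity), List.filter_append, ih]
      simp only [List.filter_cons, List.filter_nil]
      split_ifs <;> simp_all <;> omega

lemma filter_range_pair (a b n : Int) (hab : a ≤ b) :
    (PySem.List.pyRange 0 n 1).filter (fun j => decide (j = a) || decide (j = b))
    = (if 0 ≤ a ∧ a < n then [a] else []) ++ (if a < b ∧ 0 ≤ b ∧ b < n then [b] else []) := by
  by_cases hn : 0 ≤ n
  · have := filter_range_pair_nat a b hab n.toNat
    rwa [Int.toNat_of_nonneg hn] at this
  · rw [PySem.List.pyRange_one_eq_nil (by omega)]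
    split_ifs <;> (try rfl) <;> (exfalso; omega)

lemma rowA_eq (N ti tj R i : Int) :
    ((PySem.List.pyRange 0 N 1).filter (fun j => decide (|i - ti| + |j - tj| = R))).map (fun j => (i, j))
    = pvRow N ti tj R i := by
  by_cases hpos : 0 ≤ R - |i - ti|
  · have hp : (fun j => decide (|i - ti| + |j - tj| = R))
        = (fun j => decide (j = tj - (R - |i - ti|)) || decide (j = tj + (R - |i - ti|))) := by
      funext j
      rw [← Bool.decide_or, decide_eq_decide]
      simp only [Int.abs_eq_natAbs] at hpos ⊢
      omega
    rw [hp, filter_range_pair (tj - (R - |i - ti|)) (tj + (R - |i - ti|)) N (by omega)]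
    unfold pvRow
    split_ifs <;> simp <;> omega
  · have hp : List.filter (fun j => decide (|i - ti| + |j - tj| = R)) (PySem.List.pyRange 0 N 1) = [] := by
      apply List.filter_eq_nil_iff.2
      intro j _
      simp only [decide_eq_true_eq]
      simp only [Int.abs_eq_natAbs] at hpos ⊢
      omega
    rw [hp]
    unfold pvRow
    split_ifs <;> simp <;> omega

lemma candA_eq (N ti tj R : Int) :
    (PySem.List.pyRange 0 N 1).foldl (fun acc i =>
      (PySem.List.pyRange 0 N 1).foldl (fun acc2 j =>
        if |i - ti| + |j - tj| = R then acc2 ++ [(i, j)] else acc2) acc) []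
    = (PySem.List.pyRange 0 N 1).flatMap (pvRow N ti tj R) := by
  have hf : (fun (acc : List (Int × Int)) (i : Int) =>
      (PySem.List.pyRange 0 N 1).foldl (fun acc2 j =>
        if |i - ti| + |j - tj| = R then acc2 ++ [(i, j)] else acc2) acc)
      = fun acc i => acc ++ pvRow N ti tj R i := by
    funext acc i
    rw [PySem.List.foldl_append_ite (fun j => |i - ti| + |j - tj| = R) (fun j => (i, j)), rowA_eq]
  rw [hf, PySem.List.foldl_append_eq_flatMap]
  simp

-- the candidate list is strictly increasing in the lexicographic order on (i, j)
lemma cand_pairwise (N ti tj R : Int) :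
    ((PySem.List.pyRange 0 N 1).flatMap (pvRow N ti tj R)).Pairwise
      (fun x y => x.1 < y.1 ∨ (x.1 = y.1 ∧ x.2 < y.2)) := by
  rw [List.pairwise_flatMap]
  constructor
  · intro i _
    unfold pvRow
    split_ifs <;> simp_all <;> omega
  · have := PySem.List.pairwise_lt_pyRange_one (a := 0) (b := N)
    refine this.imp_of_mem ?_
    intro i i' hi hi' hlt x hx y hy
    left
    rw [pvRow_fst hx, pvRow_fst hy]
    exact hlt

lemma min2?_cons_head : ∀ (t : List (Int × Int)) (x : Int × Int),
    (∀ y ∈ t, x.1 < y.1 ∨ (x.1 = y.1 ∧ x.2 < y.2)) →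
    PySem.List.min2? (x :: t) (fun c => c.1) (fun c => c.2) = some x := by
  intro t
  induction t with
  | nil => intro x _; rfl
  | cons y t ih =>
      intro x h
      have hy := h y (by simp)
      have hstep : PySem.List.min2? (x :: y :: t) (fun c => c.1) (fun c => c.2)
          = PySem.List.min2? (x :: t) (fun c => c.1) (fun c => c.2) := by
        unfold PySem.List.min2?
        simp only [List.foldl_cons]
        congr 1
        show (if (decide (y.1 < x.1) || !decide (x.1 < y.1) && decide (y.2 < x.2)) = true then some y else some x) = some x
        have hc : (decide (y.1 < x.1) || !decide (x.1 < y.1) && decide (y.2 < x.2)) = false := by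
          rcases hy with h1 | ⟨h1, h2⟩ <;> simp <;> omega
        simp [hc]
      rw [hstep]
      exact ih x (fun z hz => h z (by simp [hz]))

lemma max2?_cons_isSome (x : Int × Int) (t : List (Int × Int)) :
    (PySem.List.max2? (x :: t) (fun c => c.1) (fun c => -c.2)).isSome := by
  unfold PySem.List.max2?
  simp only [List.foldl_cons]
  induction t generalizing x with
  | nil => rfl
  | cons y t ih => simp only [List.foldl_cons]; split <;> exact ih _

-- ===== VERDICT (by name: the statement is the Claim_ definition above) =====
theorem make_ring_candidates_spec : Claim_equal_make_ring_candidates := by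
  intro N ti tj R _
  unfold Spec_make_ring_candidates make_ring_candidates make_ring_candidates_alt
  rw [candA_eq, candB_eq]
  rcases hc : (PySem.List.pyRange 0 N 1).flatMap (pvRow N ti tj R) with _ | ⟨g1, t⟩
  · simp
  · have hpw := cand_pairwise N ti tj R
    rw [hc] at hpw
    have hmin := min2?_cons_head t g1 (List.pairwise_cons.1 hpw).1
    have hmaxS := max2?_cons_isSome g1 t
    rcases hmax : PySem.List.max2? (g1 :: t) (fun c => c.1) (fun c => -c.2) with _ | g2
    · rw [hmax] at hmaxS; simp at hmaxS
    · simp only [List.isEmpty_cons, Bool.not_false, if_true, hmin, hmax]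
      apply List.filter_congr
      intro c _
      by_cases h1 : c = g1 <;> by_cases h2 : c = g2 <;>
        by_cases h12 : g2 = g1 <;>
        simp_all [PySem.Set.add, PySem.Set.contains, PySem.Set.empty]
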